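-- pv_equiv track=rewrite | github.com/jadrens/TxPrints | tools/two_page.py | generate_unipage_pages
-- ===== SOURCE A (Python) =====
-- def generate_unipage_pages(start_page, total_pages):
--     """
--     每四页变成4123排列
--     """
--     output_pages = []
--     for i in range(total_pages):
--         output_pages.append(start_page + i*4 + 3)
--         output_pages.append(start_page + i*4)
--         output_pages.append(start_page + i*4 + 1)
--         output_pages.append(start_page + i*4 + 2)
--     return output_pages
-- ===== SOURCE B (Python) =====
-- def generate_unipage_pages(start_page, total_pages):
--     """
--     每四页变成4123排列
--     """
--     pages = list(range(start_page, start_page + 4 * total_pages))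
--     output_pages = []
--     for k in range(0, len(pages), 4):
--         group = pages[k:k + 4]
--         output_pages.extend(group[3:4] + group[0:3])
--     return output_pages
-- ===== Notes on version B (the rewrite author's own statement) =====
-- stated objective: alternative
-- what changed: B first materialises the sequential page list with range(), then walks it in chunks of four and permutes each chunk into 4123 order by slice concatenation (group[3:4] + group[0:3]), instead of A's per-element index arithmetic appends.
import Mathlib
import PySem

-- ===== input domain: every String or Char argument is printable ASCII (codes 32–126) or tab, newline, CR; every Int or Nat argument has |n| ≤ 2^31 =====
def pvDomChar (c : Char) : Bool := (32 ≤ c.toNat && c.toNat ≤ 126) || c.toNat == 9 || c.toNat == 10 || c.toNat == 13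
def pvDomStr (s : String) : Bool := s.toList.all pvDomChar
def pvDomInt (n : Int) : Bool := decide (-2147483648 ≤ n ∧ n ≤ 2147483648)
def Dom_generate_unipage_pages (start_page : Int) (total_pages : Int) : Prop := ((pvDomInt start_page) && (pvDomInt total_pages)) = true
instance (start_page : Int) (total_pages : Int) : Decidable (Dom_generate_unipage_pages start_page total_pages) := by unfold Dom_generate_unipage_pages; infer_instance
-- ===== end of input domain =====

-- B builds the sequential page list with range() and permutes each chunk of four into 4123
-- order by slice concatenation, instead of A's per-element index-arithmetic appends (alternative decomposition).

-- ===== PORT A =====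
-- output_pages = []; for i in range(total_pages): append the 4 pages in 4123 order
def generate_unipage_pages (start_page : Int) (total_pages : Int) : List Int :=
  (PySem.List.pyRange 0 total_pages 1).foldl
    (fun output_pages i =>
      output_pages ++ [start_page + i * 4 + 3, start_page + i * 4,
                       start_page + i * 4 + 1, start_page + i * 4 + 2])
    []

-- ===== PORT B =====
-- pages = list(range(start, start + 4*total)); for k in range(0, len(pages), 4):
--   group = pages[k:k+4]; extend with group[3:4] + group[0:3]
def generate_unipage_pages_alt (start_page : Int) (total_pages : Int) : List Int :=
  let pages := PySem.List.pyRange start_page (start_page + 4 * total_pages) 1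
  (PySem.List.pyRange 0 (pages.length : Int) 4).foldl
    (fun output_pages k =>
      let group := PySem.List.slice pages (some k) (some (k + 4))
      output_pages ++ (PySem.List.slice group (some 3) (some 4)
                       ++ PySem.List.slice group (some 0) (some 3)))
    []

-- ===== PRECONDITION & SPEC =====
def Spec_generate_unipage_pages (start_page : Int) (total_pages : Int) (out : List Int) : Prop := out = generate_unipage_pages_alt start_page total_pages
instance (start_page : Int) (total_pages : Int) (out : List Int) : Decidable (Spec_generate_unipage_pages start_page total_pages out) := by unfold Spec_generate_unipage_pages; infer_instance

-- ===== CLAIM (what is proved, stated in full; the proofs are below) =====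
def Claim_equal_generate_unipage_pages : Prop := ∀ (start_page : Int) (total_pages : Int), Dom_generate_unipage_pages start_page total_pages → Spec_generate_unipage_pages start_page total_pages (generate_unipage_pages start_page total_pages)

-- ===== LEMMAS AND PROOFS =====

-- The 4-element chunk of List.range (4*n) starting at 4*k, for k < n.
lemma take_drop_range_block (k n : Nat) (h : k < n) :
    List.take 4 (List.drop (4 * k) (List.range (4 * n))) = [4 * k, 4 * k + 1, 4 * k + 2, 4 * k + 3] := by
  have e1 : List.drop (4*k) (List.range (4*n)) = List.range' (4*k) (4*n - 4*k) := by
    rw [List.range_eq_range', List.drop_range']; simp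
  obtain ⟨m, hm⟩ : ∃ m, 4*n - 4*k = 4 + m := ⟨4*n-4*k-4, by omega⟩
  rw [e1, hm, ← List.range'_append]
  rw [List.take_left' (by simp)]
  simp [List.range'_succ]

-- A as a flatMap over List.range total_pages.toNat.
lemma portA_eq (s t : Int) :
    generate_unipage_pages s t
      = (List.range t.toNat).flatMap (fun k : Nat => [s + 4 * k + 3, s + 4 * k, s + 4 * k + 1, s + 4 * k + 2]) := by
  unfold generate_unipage_pages
  rw [PySem.List.foldl_append_eq_flatMap, PySem.List.pyRange_one]
  simp only [Int.sub_zero, List.flatMap_map, List.nil_append]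
  apply List.flatMap_congr
  intro a _
  ring_nf

-- B as the same flatMap.
lemma portB_eq (s t : Int) :
    generate_unipage_pages_alt s t
      = (List.range t.toNat).flatMap (fun k : Nat => [s + 4 * k + 3, s + 4 * k, s + 4 * k + 1, s + 4 * k + 2]) := by
  unfold generate_unipage_pages_alt
  by_cases ht : t ≤ 0
  · have h1 : t.toNat = 0 := by omega
    have h2 : PySem.List.pyRange s (s + 4 * t) 1 = [] := PySem.List.pyRange_one_eq_nil (by omega)
    simp only [h2, List.length_nil, Nat.cast_zero]
    rw [PySem.List.pyRange_of_pos 0 0 (by omega)]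
    simp [h1]
  · rw [Int.not_le] at ht
    set n := t.toNat with hn
    have htn : t = (n : Int) := by omega
    have hlen : (PySem.List.pyRange s (s + 4 * t) 1).length = 4 * n := by
      rw [PySem.List.length_pyRange_one]; omega
    simp only [hlen]
    rw [show ((4*n : Nat) : Int) = 4*(n:Int) from by push_cast; ring]
    have hcount : (((4 * (n:Int)) - 0 + 4 - 1) / 4).toNat = n := by omega
    rw [PySem.List.pyRange_of_pos 0 (4*(n:Int)) (by omega)]
    rw [if_pos (by omega), hcount]
    rw [PySem.List.foldl_append_eq_flatMap]
    simp only [List.nil_append, List.flatMap_map]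
    apply List.flatMap_congr
    intro k hk
    rw [List.mem_range] at hk
    have e0 : (0:Int) + 4 * (k:Int) = ((4*k : Nat) : Int) := by push_cast; ring
    have e4 : (0:Int) + 4 * (k:Int) + 4 = ((4*k : Nat) : Int) + ((4:Nat) : Int) := by push_cast; ring
    rw [e4, e0, PySem.List.slice_natCast_add]
    rw [PySem.List.pyRange_one]
    have hsub : s + 4 * t - s = ((4*n : Nat) : Int) := by omega
    rw [hsub, Int.toNat_natCast]
    rw [← List.map_drop, ← List.map_take]
    rw [take_drop_range_block k n hk]
    simp only [List.map_cons, List.map_nil]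
    rw [PySem.List.slice_toNat _ (by norm_num) (by norm_num),
        PySem.List.slice_toNat _ (by norm_num) (by norm_num)]
    simp
    ring_nf
    exact ⟨trivial, trivial, trivial⟩

-- ===== VERDICT (by name: the statement is the Claim_ definition above) =====
theorem generate_unipage_pages_spec : Claim_equal_generate_unipage_pages := by
  intro s t _
  unfold Spec_generate_unipage_pages
  rw [portA_eq, portB_eq]
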